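-- pv_equiv track=rewrite | github.com/Roshni0/AdventOfCode2020 | day07/partOne.py | part_one
-- ===== SOURCE A (Python) =====
-- def part_one(bag_list:list, looking_for:str) -> list:
--     found_list = []
--     for bag in bag_list:
--         sep = bag.find(' bags contain')
--         if looking_for in bag[sep:]:
--             found_list.append(bag[:sep])
--             found_list.extend(part_one(bag_list, bag[:sep]))
--     return found_list
-- ===== SOURCE B (Python) =====
-- def part_one(bag_list, looking_for):
--     # Split every line once, then build a reverse-containment index (name -> matching bag names)
--     # so the recursive walk never rescans/re-splits the whole list per call.
--     pairs = []
--     for bag in bag_list: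
--         sep = bag.find(' bags contain')
--         pairs.append((bag[:sep], bag[sep:]))
--     adj = {}
--     for name, _ in pairs:
--         if name not in adj:
--             adj[name] = [n for n, c in pairs if name in c]
--     if looking_for not in adj:
--         adj[looking_for] = [n for n, c in pairs if looking_for in c]
--     out = []
--     def dfs(key):
--         for name in adj[key]:
--             out.append(name)
--             dfs(name)
--     dfs(looking_for)
--     return out
-- ===== Notes on version B (the rewrite author's own statement) =====
-- stated objective: alternative
-- what changed: B splits every line once and precomputes a reverse-containment index (bag name -> list of bag names whose contents mention it); the recursive walk then follows the index instead of re-running find/slice/substring over the raw bag list at every call, trading an upfront index build for index-driven recursion.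
import Mathlib
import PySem

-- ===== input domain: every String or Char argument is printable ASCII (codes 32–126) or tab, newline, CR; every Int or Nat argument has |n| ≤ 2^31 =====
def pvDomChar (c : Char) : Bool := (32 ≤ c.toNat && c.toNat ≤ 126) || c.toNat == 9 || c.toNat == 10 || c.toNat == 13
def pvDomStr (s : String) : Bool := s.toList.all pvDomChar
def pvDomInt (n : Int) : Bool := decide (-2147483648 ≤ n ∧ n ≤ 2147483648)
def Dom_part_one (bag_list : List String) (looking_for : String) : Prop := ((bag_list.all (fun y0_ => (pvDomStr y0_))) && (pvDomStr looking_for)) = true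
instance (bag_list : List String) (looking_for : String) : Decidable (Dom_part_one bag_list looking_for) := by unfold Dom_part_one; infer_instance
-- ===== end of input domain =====

-- B builds the line splits and a reverse-containment index (bag name -> child names) once,
-- and the recursive walk then follows the index instead of re-splitting and rescanning the
-- raw lines at every call (objective: alternative; it trades an upfront index build for that).

-- ===== PORT A =====
-- A is recursive with no structural decrease; the fuel bag_list.length + 1 is a totality
-- guard only: under Pre_ (acyclic reachable containment graph) the recursion depth of the
-- Python never exceeds it, so the guard never fires on admitted inputs.
def part_one_rec (bag_list : List String) : Nat → String → List String
  | 0, _ => []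
  | fuel+1, looking_for =>
    bag_list.foldl (fun found_list bag =>
      let sep := PySem.Str.find bag " bags contain"
      if PySem.Str.isIn looking_for (PySem.Str.slice bag (some sep) none) then
        found_list ++ [PySem.Str.slice bag none (some sep)] ++
          part_one_rec bag_list fuel (PySem.Str.slice bag none (some sep))
      else found_list) []

def part_one (bag_list : List String) (looking_for : String) : List String :=
  part_one_rec bag_list (bag_list.length + 1) looking_for

-- ===== PORT B =====
-- (bag[:sep], bag[sep:]) for one line
def pvSplit (bag : String) : String × String :=
  let sep := PySem.Str.find bag " bags contain"
  (PySem.Str.slice bag none (some sep), PySem.Str.slice bag (some sep) none)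

-- [n for n, c in pairs if key in c]
def pvChildren (pairs : List (String × String)) (key : String) : List String :=
  (pairs.filter (fun p => PySem.Str.isIn key p.2)).map Prod.fst

-- adj = {}; for name, _ in pairs: if name not in adj: adj[name] = [n for n, c in pairs if name in c]
def pvBuildAdj (pairs : List (String × String)) : PySem.Dict String (List String) :=
  pairs.foldl (fun adj p =>
    if adj.contains p.1 then adj else adj.insert p.1 (pvChildren pairs p.1))
    PySem.Dict.empty

-- dfs; same fuel guard as A's port
def part_one_alt_rec (adj : PySem.Dict String (List String)) : Nat → String → List String
  | 0, _ => []
  | fuel+1, key =>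
    (adj.getD key []).foldl (fun out name =>
      out ++ [name] ++ part_one_alt_rec adj fuel name) []

def part_one_alt (bag_list : List String) (looking_for : String) : List String :=
  let pairs := bag_list.map pvSplit
  let adj0 := pvBuildAdj pairs
  let adj := if adj0.contains looking_for then adj0
             else adj0.insert looking_for (pvChildren pairs looking_for)
  part_one_alt_rec adj (bag_list.length + 1) looking_for

-- ===== PRECONDITION & SPEC =====
-- bounded closure of the containment relation (set of names reachable in ≥ 1 step)
def pvClose (pairs : List (String × String)) : Nat → List String → List String
  | 0, s => s
  | m+1, s => pvClose pairs m (PySem.Set.update s (s.flatMap (pvChildren pairs)))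

def pvReach (pairs : List (String × String)) (key : String) : List String :=
  pvClose pairs pairs.length (PySem.Set.ofList (pvChildren pairs key))

-- Pre_ excludes exactly the inputs on which the Python A recurses forever (RecursionError):
-- those where some bag name reachable from looking_for lies on a containment cycle.
def Pre_part_one (bag_list : List String) (looking_for : String) : Prop :=
  ∀ p ∈ pvReach (bag_list.map pvSplit) looking_for,
    p ∉ pvReach (bag_list.map pvSplit) p
instance (bag_list : List String) (looking_for : String) : Decidable (Pre_part_one bag_list looking_for) := by unfold Pre_part_one; infer_instance

def pvWitness_part_one : List String × String :=
  (["red bags contain 1 gold bag.", "blue bags contain 2 red bags."], "gold")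

def Spec_part_one (bag_list : List String) (looking_for : String) (out : List String) : Prop := out = part_one_alt bag_list looking_for
instance (bag_list : List String) (looking_for : String) (out : List String) : Decidable (Spec_part_one bag_list looking_for out) := by unfold Spec_part_one; infer_instance

-- ===== CLAIM (what is proved, stated in full; the proofs are below) =====
def Claim_equal_part_one : Prop := ∀ (bag_list : List String) (looking_for : String), Dom_part_one bag_list looking_for → Pre_part_one bag_list looking_for → Spec_part_one bag_list looking_for (part_one bag_list looking_for)

-- ===== LEMMAS AND PROOFS =====

-- the dict built by pvBuildAdj's loop only ever holds correct child lists
theorem pvBuildAdj_inv (pairs0 : List (String × String)) :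
    ∀ (l : List (String × String)) (d : PySem.Dict String (List String)),
      (∀ k, d.contains k = true → d.getD k [] = pvChildren pairs0 k) →
      ∀ k, (l.foldl (fun adj p =>
              if adj.contains p.1 then adj else adj.insert p.1 (pvChildren pairs0 p.1)) d).contains k = true →
            (l.foldl (fun adj p =>
              if adj.contains p.1 then adj else adj.insert p.1 (pvChildren pairs0 p.1)) d).getD k [] = pvChildren pairs0 k := by
  intro l
  induction l with
  | nil => intro d hd k hk; exact hd k hk
  | cons p l ih =>
    intro d hd k
    simp only [List.foldl_cons]
    apply ih
    intro j hj
    by_cases hc : d.contains p.1 = true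
    · simpa [hc] using hd j (by simpa [hc] using hj)
    · simp only [hc, Bool.false_eq_true, if_false] at hj ⊢
      rw [PySem.Dict.getD_insert]
      by_cases hjp : j = p.1
      · simp [hjp]
      · rw [if_neg hjp]
        apply hd
        rw [PySem.Dict.contains_insert] at hj
        simpa [hjp] using hj

-- every first component of the loop's list ends up as a key
theorem pvBuildAdj_cont (pairs0 : List (String × String)) :
    ∀ (l : List (String × String)) (d : PySem.Dict String (List String)) (k : String),
      (k ∈ l.map Prod.fst ∨ d.contains k = true) →
      (l.foldl (fun adj p =>
        if adj.contains p.1 then adj else adj.insert p.1 (pvChildren pairs0 p.1)) d).contains k = true := by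
  intro l
  induction l with
  | nil => intro d k hk; simpa using hk.resolve_left (by simp)
  | cons p l ih =>
    intro d k hk
    simp only [List.foldl_cons]
    apply ih
    by_cases hc : d.contains p.1 = true
    · simp only [hc, if_true]
      rcases hk with hk | hk
      · rcases (by simpa using hk : k = p.1 ∨ k ∈ l.map Prod.fst) with h | h
        · exact Or.inr (h ▸ hc)
        · exact Or.inl h
      · exact Or.inr hk
    · simp only [hc]
      rcases hk with hk | hk
      · rcases (by simpa using hk : k = p.1 ∨ k ∈ l.map Prod.fst) with h | h
        · exact Or.inr (by simp [h])
        · exact Or.inl h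
      · exact Or.inr (by simp [PySem.Dict.contains_insert, hk])

-- the finished index answers every relevant key with its child list
theorem pvAdjFull_getD (bag_list : List String) (looking_for : String) :
    ∀ k, (k ∈ (bag_list.map pvSplit).map Prod.fst ∨ k = looking_for) →
      (let pairs := bag_list.map pvSplit
       let adj0 := pvBuildAdj pairs
       let adj := if adj0.contains looking_for then adj0
                  else adj0.insert looking_for (pvChildren pairs looking_for)
       adj).getD k [] = pvChildren (bag_list.map pvSplit) k := by
  intro k hk
  simp only
  set pairs := bag_list.map pvSplit with hpairs
  by_cases hlf : (pvBuildAdj pairs).contains looking_for = true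
  · rw [if_pos hlf]
    rcases hk with hk | hk
    · exact pvBuildAdj_inv pairs pairs PySem.Dict.empty
        (by intro j hj; simp [PySem.Dict.contains_empty] at hj) k
        (pvBuildAdj_cont pairs pairs PySem.Dict.empty k (Or.inl hk))
    · exact pvBuildAdj_inv pairs pairs PySem.Dict.empty
        (by intro j hj; simp [PySem.Dict.contains_empty] at hj) k (hk ▸ hlf)
  · rw [if_neg hlf, PySem.Dict.getD_insert]
    by_cases hke : k = looking_for
    · simp [hke]
    · rw [if_neg hke]
      rcases hk with hk | hk
      · exact pvBuildAdj_inv pairs pairs PySem.Dict.empty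
          (by intro j hj; simp [PySem.Dict.contains_empty] at hj) k
          (pvBuildAdj_cont pairs pairs PySem.Dict.empty k (Or.inl hk))
      · exact absurd hk hke

-- the two walks agree level by level, given the index answers every key they visit
theorem pvRec_eq (bag_list : List String) (looking_for : String)
    (adj : PySem.Dict String (List String))
    (hadj : ∀ k, (k ∈ (bag_list.map pvSplit).map Prod.fst ∨ k = looking_for) →
      adj.getD k [] = pvChildren (bag_list.map pvSplit) k) :
    ∀ fuel k, (k ∈ (bag_list.map pvSplit).map Prod.fst ∨ k = looking_for) →
      part_one_rec bag_list fuel k = part_one_alt_rec adj fuel k := by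
  intro fuel
  induction fuel with
  | zero => intro k _; rfl
  | succ fuel ih =>
    intro k hk
    show bag_list.foldl _ [] = (adj.getD k []).foldl _ []
    rw [hadj k hk]
    have inner : ∀ (l : List String), (∀ b ∈ l, b ∈ bag_list) → ∀ (acc : List String),
        l.foldl (fun found_list bag =>
          let sep := PySem.Str.find bag " bags contain"
          if PySem.Str.isIn k (PySem.Str.slice bag (some sep) none) then
            found_list ++ [PySem.Str.slice bag none (some sep)] ++
              part_one_rec bag_list fuel (PySem.Str.slice bag none (some sep))
          else found_list) acc
        = (pvChildren (l.map pvSplit) k).foldl (fun out name =>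
            out ++ [name] ++ part_one_alt_rec adj fuel name) acc := by
      intro l
      induction l with
      | nil => intro _ acc; rfl
      | cons b l ihl =>
        intro hl acc
        have hb : b ∈ bag_list := hl b (by simp)
        have hmem : (pvSplit b).1 ∈ (bag_list.map pvSplit).map Prod.fst := by
          simp only [List.mem_map]
          exact ⟨pvSplit b, ⟨b, hb, rfl⟩, rfl⟩
        have hrec : part_one_rec bag_list fuel (pvSplit b).1
            = part_one_alt_rec adj fuel (pvSplit b).1 := ih _ (Or.inl hmem)
        simp only [List.foldl_cons, pvChildren, List.map_cons, List.filter_cons]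
        by_cases hc : PySem.Str.isIn k (pvSplit b).2 = true
        · have hc' : PySem.Str.isIn k
              (PySem.Str.slice b (some (PySem.Str.find b " bags contain")) none) = true := hc
          simp only [hc, if_true, hc', List.map_cons, List.foldl_cons]
          have : (PySem.Str.slice b none (some (PySem.Str.find b " bags contain")))
              = (pvSplit b).1 := rfl
          rw [this, hrec]
          exact ihl (fun x hx => hl x (by simp [hx])) _
        · have hc' : ¬ PySem.Str.isIn k
              (PySem.Str.slice b (some (PySem.Str.find b " bags contain"))  none) = true := hc
          simp only [hc, hc']
          exact ihl (fun x hx => hl x (by simp [hx])) _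
    exact inner bag_list (fun _ h => h) []

-- ===== VERDICT (by name: the statement is the Claim_ definition above) =====
theorem part_one_spec : Claim_equal_part_one := by
  intro bag_list looking_for _ _
  show part_one bag_list looking_for = part_one_alt bag_list looking_for
  unfold part_one part_one_alt
  exact pvRec_eq bag_list looking_for _
    (pvAdjFull_getD bag_list looking_for) (bag_list.length + 1) looking_for (Or.inr rfl)
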